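-- pv_equiv track=rewrite | github.com/openkim/kliff | kliff/transforms/configuration_transforms/utils.py | get_bs_size
-- ===== SOURCE A (Python) =====
-- def get_bs_size(twojmax: int, diagonal: int) -> int:
--     """
--     Return the size of bispectrum descriptor.
--
--     Args:
--         twojmax: 2x  Maximum angular momentum for bispectrum.
--         diagonal: 0, 1, 2, or 3. 0: full, 1: lower triangle, 2: diagonal, 3: upper triangle.
--     """
--     N = 0
--     for j1 in range(0, twojmax + 1):
--         if diagonal == 2:
--             N += 1
--         elif diagonal == 1:
--             for j in range(0, min(twojmax, 2 * j1) + 1, 2):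
--                 N += 1
--         elif diagonal == 0:
--             for j2 in range(0, j1 + 1):
--                 for j in range(j1 - j2, min(twojmax, j1 + j2) + 1, 2):
--                     N += 1
--         elif diagonal == 3:
--             for j2 in range(0, j1 + 1):
--                 for j in range(j1 - j2, min(twojmax, j1 + j2) + 1, 2):
--                     if j >= j1:
--                         N += 1
--     return N
-- ===== SOURCE B (Python) =====
-- def get_bs_size(twojmax: int, diagonal: int) -> int:
--     """Size of the bispectrum descriptor: one O(twojmax) pass (closed forms for
--     diagonal 1 and 2, and a closed-form inner double-sum per j1 for 0 and 3),
--     instead of A's nested counting loops."""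
--     if twojmax < 0:
--         return 0
--     t = twojmax
--     if diagonal == 2:
--         return t + 1
--     if diagonal == 1:
--         m = t // 2
--         return (m + 1) * (m + 2) // 2 + (t - m) * (m + 1)
--     if diagonal == 0:
--         total = 0
--         for j1 in range(t + 1):
--             a = t - j1
--             if j1 <= a:
--                 total += (j1 + 1) * (j1 + 2) // 2
--             else:
--                 total += (a + 1) * (a + 2) // 2 + (j1 - a) + t * t // 4 - a * a
--         return total
--     if diagonal == 3:
--         total = 0
--         for j1 in range(t + 1):
--             a = t - j1
--             k = min(j1, a)
--             total += k * k // 4 + k + 1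
--             if a < j1:
--                 q = j1 - a  # j2 ranging over (a, j1]; each consecutive pair adds a + 1
--                 total += (q // 2) * (a + 1) + (q % 2) * ((a - j1 % 2) // 2 + 1)
--         return total
--     return 0
-- ===== Notes on version B (the rewrite author's own statement) =====
-- stated objective: faster
-- what changed: B replaces A's triple nested counting loops by a single O(twojmax) pass: closed-form totals for diagonal 1 and 2, and a closed-form value of the inner double sum per j1 for diagonal 0 and 3.
import Mathlib
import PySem

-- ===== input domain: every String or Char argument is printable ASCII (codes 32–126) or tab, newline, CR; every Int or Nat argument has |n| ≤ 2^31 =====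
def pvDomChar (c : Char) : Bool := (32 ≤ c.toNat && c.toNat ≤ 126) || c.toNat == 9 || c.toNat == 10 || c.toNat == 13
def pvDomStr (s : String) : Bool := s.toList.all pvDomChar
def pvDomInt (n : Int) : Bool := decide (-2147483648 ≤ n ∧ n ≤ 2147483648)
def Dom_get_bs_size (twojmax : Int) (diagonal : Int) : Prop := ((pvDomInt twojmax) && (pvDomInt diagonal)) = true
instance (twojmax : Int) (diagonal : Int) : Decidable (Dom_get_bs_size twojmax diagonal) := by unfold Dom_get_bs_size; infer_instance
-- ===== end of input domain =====

-- B replaces A's nested counting loops by one O(twojmax) pass: closed forms for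
-- diagonal 1 and 2, and a closed-form inner double-sum per j1 for diagonal 0 and 3.

-- ===== PORT A =====
def get_bs_size (twojmax : Int) (diagonal : Int) : Int :=
  List.foldl (fun N j1 =>
    if diagonal = 2 then N + 1
    else if diagonal = 1 then
      List.foldl (fun N _ => N + 1) N
        (PySem.List.pyRange 0 (min twojmax (2 * j1) + 1) 2)
    else if diagonal = 0 then
      List.foldl (fun N j2 =>
        List.foldl (fun N _ => N + 1) N
          (PySem.List.pyRange (j1 - j2) (min twojmax (j1 + j2) + 1) 2))
        N (PySem.List.pyRange 0 (j1 + 1) 1)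
    else if diagonal = 3 then
      List.foldl (fun N j2 =>
        List.foldl (fun N j => if j1 ≤ j then N + 1 else N) N
          (PySem.List.pyRange (j1 - j2) (min twojmax (j1 + j2) + 1) 2))
        N (PySem.List.pyRange 0 (j1 + 1) 1)
    else N) 0 (PySem.List.pyRange 0 (twojmax + 1) 1)

-- ===== PORT B =====
def get_bs_size_alt (twojmax : Int) (diagonal : Int) : Int :=
  if twojmax < 0 then 0
  else if diagonal = 2 then twojmax + 1
  else if diagonal = 1 then
    let m := PySem.Int.floordiv twojmax 2
    PySem.Int.floordiv ((m + 1) * (m + 2)) 2 + (twojmax - m) * (m + 1)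
  else if diagonal = 0 then
    List.foldl (fun total j1 =>
      let a := twojmax - j1
      if j1 ≤ a then
        total + PySem.Int.floordiv ((j1 + 1) * (j1 + 2)) 2
      else
        total + (PySem.Int.floordiv ((a + 1) * (a + 2)) 2 + (j1 - a)
                 + PySem.Int.floordiv (twojmax * twojmax) 4 - a * a))
      0 (PySem.List.pyRange 0 (twojmax + 1) 1)
  else if diagonal = 3 then
    List.foldl (fun total j1 =>
      let a := twojmax - j1
      let k := min j1 a
      let total := total + (PySem.Int.floordiv (k * k) 4 + k + 1)
      if a < j1 then
        let q := j1 - a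
        total + (PySem.Int.floordiv q 2 * (a + 1)
                 + PySem.Int.mod q 2 * (PySem.Int.floordiv (a - PySem.Int.mod j1 2) 2 + 1))
      else total)
      0 (PySem.List.pyRange 0 (twojmax + 1) 1)
  else 0

-- ===== PRECONDITION & SPEC =====
def Spec_get_bs_size (twojmax : Int) (diagonal : Int) (out : Int) : Prop := out = get_bs_size_alt twojmax diagonal
instance (twojmax : Int) (diagonal : Int) (out : Int) : Decidable (Spec_get_bs_size twojmax diagonal out) := by unfold Spec_get_bs_size; infer_instance

-- ===== CLAIM (what is proved, stated in full; the proofs are below) =====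
def Claim_equal_get_bs_size : Prop := ∀ (twojmax : Int) (diagonal : Int), Dom_get_bs_size twojmax diagonal → Spec_get_bs_size twojmax diagonal (get_bs_size twojmax diagonal)

-- ===== LEMMAS AND PROOFS =====

-- a foldl that only increments its accumulator adds the list's length
theorem foldl_add_one {α : Type} (l : List α) (N : Int) :
    List.foldl (fun N _ => N + 1) N l = N + l.length := by
  induction l generalizing N with
  | nil => simp
  | cons x xs ih => simp [List.foldl, ih]; omega

-- length of a Python range with step 2
theorem length_pyRange_two (a b : Int) :
    ((PySem.List.pyRange a b 2).length : Int) = if a < b then (b - a + 1) / 2 else 0 := by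
  rw [PySem.List.pyRange_of_pos a b (by norm_num)]
  simp only [List.length_map, List.length_range]
  split <;> omega

-- counting the elements a + 2k (k < n) that reach the threshold c
theorem foldl_count_ge (c a : Int) (n : Nat) (N : Int) :
    List.foldl (fun (N : Int) (k : Nat) => if c ≤ a + 2 * (k : Int) then N + 1 else N) N (List.range n)
      = N + ((n : Int) - min (n : Int) (max 0 ((c - a + 1) / 2))) := by
  induction n generalizing N with
  | zero => simp
  | succ n ih =>
    rw [List.range_succ, List.foldl_append, ih]
    simp only [List.foldl]
    split <;> push_cast <;> omega

-- ⌊z²/4⌋ grows by ⌊z/2⌋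
theorem sq_quarter_step (z : Int) : z * z / 4 = (z - 1) * (z - 1) / 4 + z / 2 := by
  rcases Int.even_or_odd z with ⟨y, hy⟩ | ⟨y, hy⟩
  · have h1 : z * z = 4 * (y * y) := by rw [hy]; ring
    have h2 : (z - 1) * (z - 1) = 4 * (y * y) - 4 * y + 1 := by rw [hy]; ring
    rw [h1, h2]
    generalize y * y = q
    omega
  · have h1 : z * z = 4 * (y * y) + 4 * y + 1 := by rw [hy]; ring
    have h2 : (z - 1) * (z - 1) = 4 * (y * y) := by rw [hy]; ring
    rw [h1, h2]
    generalize y * y = q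
    omega

-- Gauss step: z(z+1)/2 + (z+1) = (z+1)(z+2)/2
theorem gauss_step (z : Int) : z * (z + 1) / 2 + (z + 1) = (z + 1) * (z + 2) / 2 := by
  obtain ⟨y, hy⟩ := Int.even_mul_succ_self z
  have h1 : (z + 1) * (z + 2) = z * (z + 1) + 2 * (z + 1) := by ring
  rw [h1]
  omega

-- Σ_{j1 < n} (min m j1 + 1), closed form (diagonal = 1)
theorem sum_diag1 (m n : Int) (hm : 0 ≤ m) (hn : 0 ≤ n) (N : Int) :
    List.foldl (fun N j1 => N + (min m j1 + 1)) N (PySem.List.pyRange 0 n 1)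
      = N + (if n ≤ m + 1 then n * (n + 1) / 2
             else (m + 1) * (m + 2) / 2 + (n - 1 - m) * (m + 1)) := by
  induction n, hn using Int.le_induction with
  | base =>
    rw [PySem.List.pyRange_one_eq_nil (le_refl 0), if_pos (by omega)]
    norm_num
  | succ x hx ih =>
    rw [PySem.List.pyRange_one_succ_right hx, List.foldl_append, ih]
    simp only [List.foldl]
    split_ifs with h1 h2 h2
    · -- x ≤ m
      rw [min_eq_right (by omega : x ≤ m)]
      have h0 : x + 1 + 1 = x + 2 := by ring
      rw [h0]
      linarith [gauss_step x]
    · -- x = m + 1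
      have hxm : x = m + 1 := by omega
      subst hxm
      rw [min_eq_left (by omega : m ≤ m + 1)]
      have h3 : (m + 1 + 1 - 1 - m) * (m + 1) = m + 1 := by ring
      have h4 : (m + 1) * (m + 1 + 1) = (m + 1) * (m + 2) := by ring
      rw [h3, h4]
      linarith
    · omega
    · -- x ≥ m + 2
      rw [min_eq_left (by omega : m ≤ x)]
      have h3 : (x + 1 - 1 - m) * (m + 1) = (x - 1 - m) * (m + 1) + (m + 1) := by ring
      rw [h3]
      ring
-- Σ_{j2 < n} (min (a+j2) (2 j2) / 2 + 1), closed form (diagonal = 0 inner sum)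
theorem sum_diag0 (a n : Int) (ha : 0 ≤ a) (hn : 0 ≤ n) (N : Int) :
    List.foldl (fun N j2 => N + (min (a + j2) (2 * j2) / 2 + 1)) N (PySem.List.pyRange 0 n 1)
      = N + (if n ≤ a + 1 then n * (n + 1) / 2
             else (a + 1) * (a + 2) / 2 + (n - 1 - a) + (a + n - 1) * (a + n - 1) / 4 - a * a) := by
  induction n, hn using Int.le_induction with
  | base =>
    rw [PySem.List.pyRange_one_eq_nil (le_refl 0), if_pos (by omega)]
    norm_num
  | succ x hx ih =>
    rw [PySem.List.pyRange_one_succ_right hx, List.foldl_append, ih]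
    simp only [List.foldl]
    split_ifs with h1 h2 h2
    · -- x ≤ a
      rw [min_eq_right (by omega : 2 * x ≤ a + x)]
      have h3 : 2 * x / 2 = x := by omega
      have h0 : x + 1 + 1 = x + 2 := by ring
      rw [h3, h0]
      linarith [gauss_step x]
    · -- x = a + 1
      have hxa : x = a + 1 := by omega
      subst hxa
      rw [min_eq_left (by omega : a + (a + 1) ≤ 2 * (a + 1))]
      have h3 : (a + 1) * (a + 1 + 1) = (a + 1) * (a + 2) := by ring
      have h4 : (a + (a + 1 + 1) - 1) * (a + (a + 1 + 1) - 1) = 4 * (a * a) + 4 * a + 1 := by ring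
      rw [h3, h4]
      generalize (a + 1) * (a + 2) = p
      generalize a * a = q
      omega
    · omega
    · -- x ≥ a + 2
      rw [min_eq_left (by omega : a + x ≤ 2 * x)]
      have hs := sq_quarter_step (a + x)
      have h3 : a + (x + 1) - 1 = a + x := by ring
      have h4 : (a + x - 1) * (a + x - 1) = (a + x - 1) * (a + x - 1) := rfl
      rw [h3, hs]
      generalize (a + x - 1) * (a + x - 1) = p
      generalize (a + 1) * (a + 2) = r
      generalize a * a = q
      omega

-- Σ_{j2 < n} of (j2/2 + 1 below the threshold a, (a - j2%2)/2 + 1 above), closed form (diagonal = 3 inner sum)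
theorem sum_diag3 (a n : Int) (ha : 0 ≤ a) (hn : 0 ≤ n) (N : Int) :
    List.foldl (fun N j2 => N + (if j2 ≤ a then j2 / 2 + 1 else (a - j2 % 2) / 2 + 1)) N
        (PySem.List.pyRange 0 n 1)
      = N + (if n ≤ a + 1 then (n - 1) * (n - 1) / 4 + n
             else a * a / 4 + a + 1 + (n - 1 - a) / 2 * (a + 1)
                  + (n - 1 - a) % 2 * ((a - (n - 1) % 2) / 2 + 1)) := by
  induction n, hn using Int.le_induction with
  | base =>
    rw [PySem.List.pyRange_one_eq_nil (le_refl 0), if_pos (by omega)]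
    norm_num
  | succ x hx ih =>
    rw [PySem.List.pyRange_one_succ_right hx, List.foldl_append, ih]
    simp only [List.foldl]
    by_cases hb : x ≤ a
    · rw [if_pos (by omega : x ≤ a + 1), if_pos hb, if_pos (by omega : x + 1 ≤ a + 1)]
      rw [show (x + 1 - 1) * (x + 1 - 1) = x * x from by ring, sq_quarter_step x]
      generalize (x - 1) * (x - 1) = p
      omega
    · by_cases hc : x = a + 1
      · subst hc
        rw [if_pos (by omega : a + 1 ≤ a + 1), if_neg hb, if_neg (by omega : ¬ a + 1 + 1 ≤ a + 1)]
        rw [show (a + 1 - 1) * (a + 1 - 1) = a * a from by ring,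
            show a + 1 + 1 - 1 - a = 1 from by ring,
            show a + 1 + 1 - 1 = a + 1 from by ring,
            show (1 : Int) / 2 = 0 from by norm_num,
            show (1 : Int) % 2 = 1 from by norm_num, zero_mul, one_mul]
        generalize a * a = q
        omega
      · rw [if_neg (by omega : ¬ x ≤ a + 1), if_neg hb, if_neg (by omega : ¬ x + 1 ≤ a + 1)]
        rw [show x + 1 - 1 - a = x - a from by ring, show x + 1 - 1 = x from by ring]
        rcases Int.even_or_odd (x - 1 - a) with ⟨y, hy⟩ | ⟨y, hy⟩
        · rw [show (x - a) / 2 = (x - 1 - a) / 2 from by omega,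
              show (x - a) % 2 = 1 from by omega,
              show (x - 1 - a) % 2 = 0 from by omega, zero_mul, one_mul]
          generalize (x - 1 - a) / 2 * (a + 1) = p
          omega
        · rw [show (x - a) / 2 = (x - 1 - a) / 2 + 1 from by omega,
              show (x - a) % 2 = 0 from by omega,
              show (x - 1 - a) % 2 = 1 from by omega, zero_mul, one_mul, add_mul, one_mul]
          generalize (x - 1 - a) / 2 * (a + 1) = p
          omega

theorem pv_foldl_id {α : Type} (l : List α) (N : Int) :
    List.foldl (fun (N : Int) _ => N) N l = N := by
  induction l <;> simp_all [List.foldl]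

theorem get_bs_size_eq_alt (t d : Int) : get_bs_size t d = get_bs_size_alt t d := by
  by_cases htn : t < 0
  · unfold get_bs_size get_bs_size_alt
    rw [PySem.List.pyRange_one_eq_nil (by omega : t + 1 ≤ 0), if_pos htn]
    rfl
  rw [not_lt] at htn
  by_cases hd2 : d = 2
  · subst hd2
    unfold get_bs_size get_bs_size_alt
    rw [if_neg (by omega : ¬ t < 0)]
    simp only [Int.reduceEq, reduceIte]
    rw [PySem.List.foldl_congr_mem _ _ (fun (N : Int) (_ : Int) => N + 1) 0 (by intro N x _; simp)]
    rw [foldl_add_one, PySem.List.length_pyRange_one]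
    omega
  by_cases hd1 : d = 1
  · subst hd1
    unfold get_bs_size get_bs_size_alt
    rw [if_neg (by omega : ¬ t < 0)]
    simp only [Int.reduceEq, reduceIte]
    simp only [PySem.Int.floordiv_eq_ediv_of_pos (show (0:Int) < 2 by norm_num)]
    rw [PySem.List.foldl_congr_mem _ _ (fun (N j1 : Int) => N + (min (t / 2) j1 + 1)) 0 ?pw1]
    case pw1 =>
      intro N j1 hj1
      rw [PySem.List.mem_pyRange_one] at hj1
      dsimp only
      rw [foldl_add_one, length_pyRange_two 0 (min t (2 * j1) + 1)]
      split <;> omega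
    rw [sum_diag1 (t / 2) (t + 1) (by omega) (by omega) 0]
    by_cases ht0 : t = 0
    · subst ht0; decide
    · rw [if_neg (by omega), show t + 1 - 1 - t / 2 = t - t / 2 from by ring]
      linarith
  by_cases hd0 : d = 0
  · subst hd0
    unfold get_bs_size get_bs_size_alt
    rw [if_neg (by omega : ¬ t < 0)]
    simp only [Int.reduceEq, reduceIte]
    simp only [PySem.Int.floordiv_eq_ediv_of_pos (show (0:Int) < 2 by norm_num),
               PySem.Int.floordiv_eq_ediv_of_pos (show (0:Int) < 4 by norm_num)]
    apply PySem.List.foldl_congr_mem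
    intro N j1 hj1
    rw [PySem.List.mem_pyRange_one] at hj1
    dsimp only
    rw [PySem.List.foldl_congr_mem _ _ (fun (N j2 : Int) => N + (min (t - j1 + j2) (2 * j2) / 2 + 1)) N ?pw0]
    case pw0 =>
      intro M j2 hj2
      rw [PySem.List.mem_pyRange_one] at hj2
      dsimp only
      rw [foldl_add_one, length_pyRange_two (j1 - j2) (min t (j1 + j2) + 1)]
      split <;> omega
    rw [sum_diag0 (t - j1) (j1 + 1) (by omega) (by omega) N]
    by_cases hba : j1 ≤ t - j1
    · rw [if_pos (by omega : j1 + 1 ≤ t - j1 + 1), if_pos hba,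
          show j1 + 1 + 1 = j1 + 2 from by ring]
    · rw [if_neg (by omega), if_neg hba,
          show t - j1 + (j1 + 1) - 1 = t from by ring,
          show j1 + 1 - 1 - (t - j1) = j1 - (t - j1) from by ring]
  by_cases hd3 : d = 3
  · subst hd3
    unfold get_bs_size get_bs_size_alt
    rw [if_neg (by omega : ¬ t < 0)]
    simp only [Int.reduceEq, reduceIte]
    simp only [PySem.Int.floordiv_eq_ediv_of_pos (show (0:Int) < 2 by norm_num),
               PySem.Int.floordiv_eq_ediv_of_pos (show (0:Int) < 4 by norm_num),
               PySem.Int.mod_eq_emod_of_pos (show (0:Int) < 2 by norm_num)]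
    apply PySem.List.foldl_congr_mem
    intro N j1 hj1
    rw [PySem.List.mem_pyRange_one] at hj1
    dsimp only
    rw [PySem.List.foldl_congr_mem _ _
          (fun (N j2 : Int) => N + (if j2 ≤ t - j1 then j2 / 2 + 1 else (t - j1 - j2 % 2) / 2 + 1)) N ?pw3]
    case pw3 =>
      intro M j2 hj2
      rw [PySem.List.mem_pyRange_one] at hj2
      dsimp only
      rw [PySem.List.pyRange_of_pos _ _ (show (0:Int) < 2 by norm_num), List.foldl_map, foldl_count_ge]
      split <;> split <;> omega
    rw [sum_diag3 (t - j1) (j1 + 1) (by omega) (by omega) N]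
    by_cases hba : t - j1 < j1
    · rw [if_neg (by omega : ¬ j1 + 1 ≤ t - j1 + 1), if_pos hba,
          min_eq_right (by omega : t - j1 ≤ j1),
          show j1 + 1 - 1 - (t - j1) = j1 - (t - j1) from by ring,
          show j1 + 1 - 1 = j1 from by ring]
      linarith
    · rw [if_pos (by omega : j1 + 1 ≤ t - j1 + 1), if_neg hba,
          min_eq_left (by omega : j1 ≤ t - j1),
          show j1 + 1 - 1 = j1 from by ring]
      linarith
  -- diagonal outside {0,1,2,3}: both sides are 0
  unfold get_bs_size get_bs_size_alt
  rw [if_neg (by omega), if_neg hd2, if_neg hd1, if_neg hd0, if_neg hd3]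
  rw [PySem.List.foldl_congr_mem _ _ (fun (N : Int) (_ : Int) => N) 0
        (by intro N x _; simp [hd2, hd1, hd0, hd3])]
  rw [pv_foldl_id]

-- ===== VERDICT (by name: the statement is the Claim_ definition above) =====
theorem get_bs_size_spec : Claim_equal_get_bs_size := by
  intro t d _
  unfold Spec_get_bs_size
  exact get_bs_size_eq_alt t d
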